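-- pv_equiv track=rewrite | github.com/marcoboucas/health_data_challenge | src/base/base_ner.py | character_to_line_and_word
-- ===== SOURCE A (Python) =====
-- from typing import List, Tuple, Union
--
-- def character_to_line_and_word(text: str, character_position: int) -> Tuple[int, int]:
--     """Return line and word position from index.
--
--     - The line (starts at 1)
--     - The word position (starts at 0)
--     """
--     text_length = 0
--     for line_num, line in enumerate(text.split("\n")):
--         if character_position < text_length + (len(line) + 1):
--             line_length = 0
--             for word_position, word in enumerate(line.split(" ")):
--                 if character_position <= text_length + line_length + len(word):
--                     return line_num + 1, word_position
--
--                 line_length += len(word) + 1  # word length + ' '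
--
--         text_length += len(line) + 1  # line length + \n char
--
--     return -1, -1
-- ===== SOURCE B (Python) =====
-- def character_to_line_and_word(text, character_position):
--     """Return (line starting at 1, word index starting at 0) for a character index.
--
--     Positions past the end of the text map to (-1, -1).
--     """
--     if character_position > len(text):
--         return -1, -1
--     prefix = text[:max(character_position, 0)]
--     current_line = prefix.split("\n")[-1]
--     return prefix.count("\n") + 1, current_line.count(" ")
-- ===== Notes on version B (the rewrite author's own statement) =====
-- stated objective: simpler
-- what changed: Replaces the nested line/word scanning loops with running offsets by a loop-free formulation: slice the prefix up to the position, count newlines for the line number and count spaces in the last line segment for the word index.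
import Mathlib
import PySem

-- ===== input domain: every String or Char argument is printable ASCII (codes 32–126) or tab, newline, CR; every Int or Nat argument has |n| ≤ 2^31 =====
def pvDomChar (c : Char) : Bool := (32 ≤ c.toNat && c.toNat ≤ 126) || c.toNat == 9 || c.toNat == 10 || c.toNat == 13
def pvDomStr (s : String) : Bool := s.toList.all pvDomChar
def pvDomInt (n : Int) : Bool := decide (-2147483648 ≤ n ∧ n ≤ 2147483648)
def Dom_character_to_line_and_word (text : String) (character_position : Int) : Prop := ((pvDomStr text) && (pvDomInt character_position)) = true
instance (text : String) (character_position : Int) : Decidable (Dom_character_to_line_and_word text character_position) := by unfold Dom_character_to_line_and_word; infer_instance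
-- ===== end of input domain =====

-- B replaces A's nested line/word scanning loops by slice-and-count on the prefix; proved equal on all inputs.

-- ===== PORT A =====
-- inner loop: 'for word_position, word in enumerate(line.split(" ")): …' (early return as Option)
def pvInnerA (cp tl : Int) : List (List Char) → Int → Int → Option Int
  | [], _, _ => none
  | w :: ws, wp, ll =>
    if cp ≤ tl + ll + (w.length : Int) then some wp
    else pvInnerA cp tl ws (wp + 1) (ll + (w.length : Int) + 1)

-- outer loop: 'for line_num, line in enumerate(text.split("\n")): …'
def pvOuterA (cp : Int) : List (List Char) → Int → Int → Int × Int
  | [], _, _ => (-1, -1)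
  | line :: rest, ln, tl =>
    if cp < tl + ((line.length : Int) + 1) then
      match pvInnerA cp tl (PySem.Chars.splitOn line [' ']) 0 0 with
      | some wp => (ln + 1, wp)
      | none => pvOuterA cp rest (ln + 1) (tl + (line.length : Int) + 1)
    else pvOuterA cp rest (ln + 1) (tl + (line.length : Int) + 1)

def character_to_line_and_word (text : String) (character_position : Int) : Int × Int :=
  pvOuterA character_position (PySem.Chars.splitOn text.toList ['\n']) 0 0

-- ===== PORT B =====
def character_to_line_and_word_alt (text : String) (character_position : Int) : Int × Int :=
  let s := text.toList
  if character_position > (s.length : Int) then (-1, -1)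
  else
    let pre := PySem.List.slice s none (some (max character_position 0))
    -- prefix.split("\n")[-1]; the split of a string is never empty, so the [-1] never raises
    let curLine := (PySem.List.pyGet? (PySem.Chars.splitOn pre ['\n']) (-1)).getD []
    ((PySem.Chars.count pre ['\n'] : Int) + 1, (PySem.Chars.count curLine [' '] : Int))

-- ===== PRECONDITION & SPEC =====
def Spec_character_to_line_and_word (text : String) (character_position : Int) (out : Int × Int) : Prop := out = character_to_line_and_word_alt text character_position
instance (text : String) (character_position : Int) (out : Int × Int) : Decidable (Spec_character_to_line_and_word text character_position out) := by unfold Spec_character_to_line_and_word; infer_instance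

-- ===== CLAIM (what is proved, stated in full; the proofs are below) =====
def Claim_equal_character_to_line_and_word : Prop := ∀ (text : String) (character_position : Int), Dom_character_to_line_and_word text character_position → Spec_character_to_line_and_word text character_position (character_to_line_and_word text character_position)

-- ===== LEMMAS AND PROOFS =====

-- every list is either c-free or splits at the FIRST occurrence of c
lemma pv_classify (c : Char) : ∀ l : List Char, c ∉ l ∨ ∃ l1 l2, c ∉ l1 ∧ l = l1 ++ c :: l2 := by
  intro l
  induction l with
  | nil => exact Or.inl (by simp)
  | cons a t ih =>
    by_cases hac : a = c
    · exact Or.inr ⟨[], t, by simp, by simp [hac]⟩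
    · rcases ih with h | ⟨l1, l2, h1, h2⟩
      · exact Or.inl (by simp [h, Ne.symm hac])
      · exact Or.inr ⟨a :: l1, l2, by simp [h1, Ne.symm hac], by simp [h2]⟩

lemma pv_go_nil (c : Char) (f : Nat) (cur : List Char) (acc : List (List Char)) :
    PySem.Chars.splitOn.go [c] f [] cur acc = (cur.reverse :: acc).reverse := by
  cases f <;> simp [PySem.Chars.splitOn.go]

lemma pv_go_cons (c a : Char) (t : List Char) (f : Nat) (cur : List Char) (acc : List (List Char)) :
    PySem.Chars.splitOn.go [c] (f+1) (a :: t) cur acc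
    = if c = a then PySem.Chars.splitOn.go [c] f t [] (cur.reverse :: acc)
      else PySem.Chars.splitOn.go [c] f t (a :: cur) acc := by
  simp [PySem.Chars.splitOn.go, List.isPrefixOf]

-- splitOn.go is fuel-insensitive once the fuel covers the input
lemma pv_go_fuel (c : Char) : ∀ (l : List Char) (f g : Nat) (cur : List Char) (acc : List (List Char)),
    l.length ≤ f → l.length ≤ g →
    PySem.Chars.splitOn.go [c] f l cur acc = PySem.Chars.splitOn.go [c] g l cur acc := by
  intro l
  induction l with
  | nil => intro f g cur acc _ _; rw [pv_go_nil, pv_go_nil]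
  | cons a t ih =>
    intro f g cur acc hf hg
    simp only [List.length_cons] at hf hg
    obtain ⟨f', rfl⟩ : ∃ f', f = f' + 1 := ⟨f - 1, by omega⟩
    obtain ⟨g', rfl⟩ : ∃ g', g = g' + 1 := ⟨g - 1, by omega⟩
    rw [pv_go_cons, pv_go_cons]
    split_ifs with h
    · exact ih f' g' _ _ (by omega) (by omega)
    · exact ih f' g' _ _ (by omega) (by omega)

-- the accumulator comes out in front
lemma pv_go_acc (c : Char) : ∀ (l : List Char) (f : Nat) (cur : List Char) (acc : List (List Char)),
    PySem.Chars.splitOn.go [c] f l cur acc = acc.reverse ++ PySem.Chars.splitOn.go [c] f l cur [] := by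
  intro l
  induction l with
  | nil => intro f cur acc; rw [pv_go_nil, pv_go_nil]; simp
  | cons a t ih =>
    intro f cur acc
    cases f with
    | zero => simp [PySem.Chars.splitOn.go]
    | succ f' =>
      rw [pv_go_cons, pv_go_cons]
      split_ifs with h
      · rw [ih f' [] (cur.reverse :: acc), ih f' [] [cur.reverse]]; simp
      · rw [ih f' (a :: cur) acc]

lemma pv_go_free (c : Char) : ∀ (l : List Char) (f : Nat) (cur : List Char) (acc : List (List Char)),
    l.length ≤ f → c ∉ l →
    PySem.Chars.splitOn.go [c] f l cur acc = acc.reverse ++ [cur.reverse ++ l] := by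
  intro l
  induction l with
  | nil => intro f cur acc _ _; rw [pv_go_nil]; simp
  | cons a t ih =>
    intro f cur acc hf hm
    obtain ⟨f', rfl⟩ : ∃ f', f = f' + 1 := ⟨f - 1, by simp at hf; omega⟩
    rw [pv_go_cons]
    simp only [List.mem_cons, not_or] at hm
    rw [if_neg hm.1]
    rw [ih f' (a :: cur) acc (by simp at hf; omega) hm.2]
    simp

lemma pv_splitOn_free {c : Char} {l : List Char} (h : c ∉ l) :
    PySem.Chars.splitOn l [c] = [l] := by
  unfold PySem.Chars.splitOn
  rw [pv_go_free c l (l.length + 1) [] [] (by omega) h]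
  simp

lemma pv_splitOn_split {c : Char} {l1 : List Char} (l2 : List Char) (h : c ∉ l1) :
    PySem.Chars.splitOn (l1 ++ c :: l2) [c] = l1 :: PySem.Chars.splitOn l2 [c] := by
  have step : ∀ (ll : List Char) (f : Nat) (cur : List Char) (acc : List (List Char)),
      c ∉ ll → (ll ++ c :: l2).length ≤ f →
      PySem.Chars.splitOn.go [c] f (ll ++ c :: l2) cur acc
      = PySem.Chars.splitOn.go [c] (l2.length + 1) l2 [] ((cur.reverse ++ ll) :: acc) := by
    intro ll
    induction ll with
    | nil =>
      intro f cur acc _ hf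
      simp only [List.nil_append, List.length_cons] at hf
      obtain ⟨f', rfl⟩ : ∃ f', f = f' + 1 := ⟨f - 1, by omega⟩
      rw [List.nil_append, pv_go_cons, if_pos rfl]
      simp only [List.append_nil]
      exact pv_go_fuel c l2 f' (l2.length + 1) [] _ (by omega) (by omega)
    | cons a t ih =>
      intro f cur acc hm hf
      simp only [List.mem_cons, not_or] at hm
      simp only [List.cons_append, List.length_cons] at hf
      obtain ⟨f', rfl⟩ : ∃ f', f = f' + 1 := ⟨f - 1, by omega⟩
      rw [List.cons_append, pv_go_cons, if_neg hm.1]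
      rw [ih f' (a :: cur) acc hm.2 (by simp at hf ⊢; omega)]
      simp
  unfold PySem.Chars.splitOn
  rw [step l1 _ [] [] h (by omega)]
  rw [pv_go_acc]
  simp

lemma pv_splitOn_ne_nil (c : Char) (l : List Char) : PySem.Chars.splitOn l [c] ≠ [] := by
  rcases pv_classify c l with h | ⟨l1, l2, h1, rfl⟩
  · simp [pv_splitOn_free h]
  · simp [pv_splitOn_split l2 h1]

lemma pv_count_go (c : Char) : ∀ (l : List Char) (f : Nat) (acc : Nat),
    l.length ≤ f → PySem.Chars.count.go [c] f l acc = acc + l.count c := by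
  intro l
  induction l with
  | nil => intro f acc _; cases f <;> simp [PySem.Chars.count.go]
  | cons a t ih =>
    intro f acc hf
    simp only [List.length_cons] at hf
    obtain ⟨f', rfl⟩ : ∃ f', f = f' + 1 := ⟨f - 1, by omega⟩
    rw [show PySem.Chars.count.go [c] (f' + 1) (a :: t) acc
        = if [c].isPrefixOf (a :: t) then PySem.Chars.count.go [c] f' (List.drop 1 (a :: t)) (acc + 1)
          else PySem.Chars.count.go [c] f' t acc from by simp [PySem.Chars.count.go]]
    by_cases h : c = a
    · rw [if_pos (by simp [List.isPrefixOf, h]), List.drop_one, List.tail_cons,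
        ih f' (acc + 1) (by omega)]
      subst h
      simp
      omega
    · rw [if_neg (by simp [List.isPrefixOf, h]), ih f' acc (by omega)]
      simp [Ne.symm h]

-- single-character str.count is list count
lemma pv_count_char (c : Char) (l : List Char) :
    PySem.Chars.count l [c] = l.count c := by
  unfold PySem.Chars.count
  rw [if_neg (by simp)]
  simpa using pv_count_go c l l.length 0 (le_refl _)

lemma pv_count_take_free {c : Char} {l : List Char} (h : c ∉ l) (k : Nat) :
    (l.take k).count c = 0 :=
  List.count_eq_zero.mpr (fun hm => h (List.mem_of_mem_take hm))

-- the word loop of A returns wp + (spaces in the clamped prefix of the line)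
lemma pv_inner_aux : ∀ (n : Nat) (line : List Char), line.length ≤ n → ∀ (cp tl ll wp : Int),
    pvInnerA cp tl (PySem.Chars.splitOn line [' ']) wp ll
    = if cp ≤ tl + ll + (line.length : Int)
      then some (wp + (((line.take (cp - tl - ll).toNat).count ' ' : Nat) : Int))
      else none := by
  intro n
  induction n with
  | zero =>
    intro line hlen cp tl ll wp
    have : line = [] := List.length_eq_zero_iff.mp (by omega)
    subst this
    rw [pv_splitOn_free (by simp)]
    simp [pvInnerA]
  | succ n ih =>
    intro line hlen cp tl ll wp
    rcases pv_classify ' ' line with hfree | ⟨w, rest, hw, rfl⟩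
    · rw [pv_splitOn_free hfree]
      simp only [pvInnerA]
      split_ifs with h1
      · rw [pv_count_take_free hfree]; simp
      · rfl
    · rw [pv_splitOn_split rest hw]
      simp only [pvInnerA]
      have hlens : (w ++ ' ' :: rest).length = w.length + 1 + rest.length := by simp; omega
      by_cases h1 : cp ≤ tl + ll + (w.length : Int)
      · rw [if_pos h1, if_pos (by rw [hlens]; push_cast; omega)]
        rw [List.take_append_of_le_length (by omega : (cp - tl - ll).toNat ≤ w.length)]
        rw [pv_count_take_free hw]
        simp
      · rw [if_neg h1]
        rw [ih rest (by simp at hlen; omega) cp tl (ll + (w.length : Int) + 1) (wp + 1)]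
        have hc : (cp ≤ tl + (ll + (w.length : Int) + 1) + (rest.length : Int))
            ↔ (cp ≤ tl + ll + ((w ++ ' ' :: rest).length : Int)) := by rw [hlens]; push_cast; omega
        split_ifs with h2 h3 h4
        · have hk : (cp - tl - ll).toNat = w.length + 1 + (cp - tl - (ll + (w.length : Int) + 1)).toNat := by omega
          rw [hk, show w.length + 1 + (cp - tl - (ll + (w.length : Int) + 1)).toNat
              = (w ++ [' ']).length + (cp - tl - (ll + (w.length : Int) + 1)).toNat by simp,
            show w ++ ' ' :: rest = (w ++ [' ']) ++ rest by simp,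
            List.take_length_add_append]
          rw [List.count_append, List.count_append, List.count_eq_zero.mpr hw]
          simp only [List.count_singleton]
          congr 1
          push_cast
          simp only [if_true]
          omega
        · exact absurd (hc.mp h2) h3
        · exact absurd (hc.mpr h4) h2
        · rfl

lemma pv_getLastD_cons (a : List Char) (l : List (List Char)) (h : l ≠ []) :
    (a :: l).getLastD [] = l.getLastD [] := by
  cases l with
  | nil => exact absurd rfl h
  | cons b t => simp

-- the line loop of A computes B's two counts on the clamped prefix of the remaining text
lemma pv_outer_aux : ∀ (n : Nat) (l : List Char), l.length ≤ n → ∀ (cp ln tl : Int),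
    pvOuterA cp (PySem.Chars.splitOn l ['\n']) ln tl
    = if cp ≤ tl + (l.length : Int)
      then (ln + 1 + (((l.take (cp - tl).toNat).count '\n' : Nat) : Int),
            ((((PySem.Chars.splitOn (l.take (cp - tl).toNat) ['\n']).getLastD []).count ' ' : Nat) : Int))
      else (-1, -1) := by
  intro n
  induction n with
  | zero =>
    intro l hlen cp ln tl
    have : l = [] := List.length_eq_zero_iff.mp (by omega)
    subst this
    rw [pv_splitOn_free (by simp)]
    simp only [pvOuterA]
    rw [pv_inner_aux 0 [] (by simp) cp tl 0 0]
    simp only [List.length_nil, List.take_nil]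
    rw [pv_splitOn_free (by simp)]
    split_ifs with h1 h2 h3 h4 <;> simp_all <;> omega
  | succ n ih =>
    intro l hlen cp ln tl
    rcases pv_classify '\n' l with hfree | ⟨l1, l2, h1f, rfl⟩
    · -- no newline: a single line
      rw [pv_splitOn_free hfree]
      simp only [pvOuterA]
      rw [pv_inner_aux (l.length) l (le_refl _) cp tl 0 0]
      have hpre : '\n' ∉ l.take (cp - tl).toNat := fun hm => hfree (List.mem_of_mem_take hm)
      rw [pv_splitOn_free hpre]
      by_cases h1 : cp ≤ tl + (l.length : Int)
      · rw [if_pos (by omega), if_pos (by omega : cp ≤ tl + 0 + (l.length : Int)), if_pos h1]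
        simp only [List.getLastD]
        rw [pv_count_take_free hfree]
        norm_num
      · rw [if_neg (by omega), if_neg h1]
    · -- l = l1 ++ '\n' :: l2
      rw [pv_splitOn_split l2 h1f]
      simp only [pvOuterA]
      rw [pv_inner_aux (l1.length) l1 (le_refl _) cp tl 0 0]
      have hlens : ((l1 ++ '\n' :: l2).length : Int) = (l1.length : Int) + 1 + (l2.length : Int) := by
        push_cast [List.length_append, List.length_cons]; omega
      by_cases h1 : cp ≤ tl + (l1.length : Int)
      · rw [if_pos (by omega), if_pos (by omega : cp ≤ tl + 0 + (l1.length : Int)), if_pos (by rw [hlens]; omega)]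
        rw [List.take_append_of_le_length (by omega : (cp - tl).toNat ≤ l1.length)]
        have hpre : '\n' ∉ l1.take (cp - tl).toNat := fun hm => h1f (List.mem_of_mem_take hm)
        rw [pv_splitOn_free hpre]
        simp only [List.getLastD]
        rw [pv_count_take_free h1f]
        norm_num
      · -- past this line: recurse
        rw [if_neg (by omega), ih l2 (by simp only [List.length_append, List.length_cons] at hlen; omega) cp (ln + 1) (tl + (l1.length : Int) + 1)]
        by_cases h2 : cp ≤ tl + ((l1 ++ '\n' :: l2).length : Int)
        · rw [if_pos (by rw [hlens] at h2; omega), if_pos h2]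
          have hk : (cp - tl).toNat = (l1 ++ ['\n']).length + (cp - (tl + (l1.length : Int) + 1)).toNat := by
            simp only [List.length_append, List.length_cons, List.length_nil]; omega
          rw [show l1 ++ '\n' :: l2 = (l1 ++ ['\n']) ++ l2 by simp, hk, List.take_length_add_append]
          set m := (cp - (tl + (l1.length : Int) + 1)).toNat with hm
          rw [show (l1 ++ ['\n']) ++ l2.take m = l1 ++ '\n' :: l2.take m by simp]
          rw [pv_splitOn_split (l2.take m) h1f]
          rw [pv_getLastD_cons _ _ (pv_splitOn_ne_nil '\n' (l2.take m))]
          rw [List.count_append, List.count_cons, List.count_eq_zero.mpr h1f]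
          simp only [Prod.mk.injEq]
          refine ⟨?_, trivial⟩
          push_cast
          simp
          omega
        · rw [if_neg (by rw [hlens] at h2; omega), if_neg h2]

-- ===== VERDICT (by name: the statement is the Claim_ definition above) =====
theorem character_to_line_and_word_spec : Claim_equal_character_to_line_and_word := by
  intro text cp _
  unfold Spec_character_to_line_and_word character_to_line_and_word character_to_line_and_word_alt
  rw [pv_outer_aux (text.toList.length) text.toList (le_refl _) cp 0 0]
  by_cases h : cp > (text.toList.length : Int)
  · rw [if_pos h, if_neg (by omega)]
  · rw [if_neg h, if_pos (by omega)]
    have hslice : PySem.List.slice text.toList none (some (max cp 0)) = text.toList.take cp.toNat := by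
      rw [PySem.List.slice_to text.toList (le_max_right cp 0)]
      congr 1
      omega
    simp only [hslice]
    have hget : (PySem.List.pyGet? (PySem.Chars.splitOn (text.toList.take cp.toNat) ['\n']) (-1)).getD ([] : List Char)
        = (PySem.Chars.splitOn (text.toList.take cp.toNat) ['\n']).getLastD [] := by
      simp [pysem]
    rw [hget, pv_count_char, pv_count_char]
    have h0 : (cp - 0).toNat = cp.toNat := by omega
    rw [h0]
    simp only [Prod.mk.injEq]
    exact ⟨by omega, trivial⟩
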